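-- pv_equiv track=rewrite | github.com/Bandi-Lavanya/DSA-Python- | Arrays/RearrangeArrEle.py | rearrange_by_sign_optimal
-- ===== SOURCE A (Python) =====
-- def rearrange_by_sign_optimal(arr):
--     n = len(arr)
--     ans = [0] * n  # Initialize result array with 0s
--
--     pos_index = 0  # Start filling positives at even indices
--     neg_index = 1  # Start filling negatives at odd indices
--
--     for num in arr:
--         if num < 0:
--             ans[neg_index] = num
--             neg_index += 2
--         else:
--             ans[pos_index] = num
--             pos_index += 2
--
--     return ans
-- ===== SOURCE B (Python) =====
-- def rearrange_by_sign_optimal(arr):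
--     pos = [x for x in arr if x >= 0]
--     neg = [x for x in arr if x < 0]
--     ans = [0] * len(arr)
--     for i, p in enumerate(pos):
--         ans[2 * i] = p
--     for i, q in enumerate(neg):
--         ans[2 * i + 1] = q
--     return ans
-- ===== Notes on version B (the rewrite author's own statement) =====
-- stated objective: alternative
-- what changed: B partitions the array into nonnegatives and negatives first and then places each group with its own indexed loop (pos[i] at 2i, neg[i] at 2i+1), instead of A's single interleaved pass branching per element with two running cursors.
import Mathlib
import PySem

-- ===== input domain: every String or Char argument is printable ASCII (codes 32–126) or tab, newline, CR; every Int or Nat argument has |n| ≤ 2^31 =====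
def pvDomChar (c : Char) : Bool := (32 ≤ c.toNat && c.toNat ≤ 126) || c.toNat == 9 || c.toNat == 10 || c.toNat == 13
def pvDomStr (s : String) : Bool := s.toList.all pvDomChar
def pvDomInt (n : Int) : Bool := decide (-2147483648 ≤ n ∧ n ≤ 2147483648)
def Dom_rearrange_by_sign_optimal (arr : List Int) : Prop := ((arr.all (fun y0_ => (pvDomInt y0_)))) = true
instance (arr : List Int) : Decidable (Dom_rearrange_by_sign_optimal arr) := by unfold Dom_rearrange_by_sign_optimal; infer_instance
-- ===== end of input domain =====

-- B partitions the input into nonnegatives and negatives and places each group with its own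
-- indexed loop, instead of A's single branching pass with two cursors; same O(n) cost (objective: alternative).

-- ===== PORT A =====
-- the for-loop of A: state = (ans, pos_index, neg_index)
def pvGoA (ans : List Int) (posIdx negIdx : Int) : List Int → List Int
  | [] => ans
  | num :: rest =>
    if num < 0 then pvGoA (PySem.List.pySetD ans negIdx num) posIdx (negIdx + 2) rest
    else pvGoA (PySem.List.pySetD ans posIdx num) (posIdx + 2) negIdx rest

def rearrange_by_sign_optimal (arr : List Int) : List Int :=
  pvGoA (List.replicate arr.length 0) 0 1 arr

-- ===== PORT B =====
def rearrange_by_sign_optimal_alt (arr : List Int) : List Int :=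
  let pos := arr.filter (fun x => 0 ≤ x)
  let neg := arr.filter (fun x => x < 0)
  let ans0 := List.replicate arr.length 0
  let ans1 := (PySem.List.enumerate pos 0).foldl
    (fun a ip => PySem.List.pySetD a (2 * ip.1) ip.2) ans0
  (PySem.List.enumerate neg 0).foldl
    (fun a iq => PySem.List.pySetD a (2 * iq.1 + 1) iq.2) ans1

-- ===== PRECONDITION & SPEC =====
-- Pre_ excludes exactly the inputs on which Python A raises IndexError mid-loop
-- (more negatives than nonnegatives, or nonnegatives exceeding negatives by 2 or more).
def Pre_rearrange_by_sign_optimal (arr : List Int) : Prop :=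
  arr.countP (fun x => x < 0) ≤ arr.countP (fun x => 0 ≤ x) ∧
  arr.countP (fun x => 0 ≤ x) ≤ arr.countP (fun x => x < 0) + 1
instance (arr : List Int) : Decidable (Pre_rearrange_by_sign_optimal arr) := by
  unfold Pre_rearrange_by_sign_optimal; infer_instance

def pvWitness_rearrange_by_sign_optimal : List Int := [3, -1, 0, -2]

def Spec_rearrange_by_sign_optimal (arr : List Int) (out : List Int) : Prop := out = rearrange_by_sign_optimal_alt arr
instance (arr : List Int) (out : List Int) : Decidable (Spec_rearrange_by_sign_optimal arr out) := by unfold Spec_rearrange_by_sign_optimal; infer_instance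

-- ===== CLAIM (what is proved, stated in full; the proofs are below) =====
def Claim_equal_rearrange_by_sign_optimal : Prop := ∀ (arr : List Int), Dom_rearrange_by_sign_optimal arr → Pre_rearrange_by_sign_optimal arr → Spec_rearrange_by_sign_optimal arr (rearrange_by_sign_optimal arr)

-- ===== LEMMAS AND PROOFS =====
-- B's two placement folds, named for the proofs
def pvFpos (ans : List Int) (l : List (Int × Int)) : List Int :=
  l.foldl (fun a ip => PySem.List.pySetD a (2 * ip.1) ip.2) ans
def pvFneg (ans : List Int) (l : List (Int × Int)) : List Int :=
  l.foldl (fun a iq => PySem.List.pySetD a (2 * iq.1 + 1) iq.2) ans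

theorem pvSetD_comm (a : List Int) (i j v w : Int) (hi : 0 ≤ i) (hj : 0 ≤ j) (h : i ≠ j) :
    PySem.List.pySetD (PySem.List.pySetD a i v) j w
      = PySem.List.pySetD (PySem.List.pySetD a j w) i v := by
  rw [PySem.List.pySetD_of_nonneg _ _ hi, PySem.List.pySetD_of_nonneg _ _ hj,
      PySem.List.pySetD_of_nonneg _ _ hj, PySem.List.pySetD_of_nonneg _ _ hi]
  exact List.set_comm _ _ (by omega)

-- an odd-indexed write passes through the nonnegative (even-index) placement fold
theorem pvFpos_set (ps : List Int) (p : Int) (ans : List Int) (j v : Int)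
    (hp : 0 ≤ p) (hj : 0 ≤ j) (hjo : j % 2 = 1) :
    pvFpos (PySem.List.pySetD ans j v) (PySem.List.enumerate ps p)
      = PySem.List.pySetD (pvFpos ans (PySem.List.enumerate ps p)) j v := by
  induction ps generalizing p ans with
  | nil => simp [pvFpos, PySem.List.enumerate_nil]
  | cons x xs ih =>
    rw [PySem.List.enumerate_cons]
    simp only [pvFpos, List.foldl_cons]
    rw [pvSetD_comm ans j (2 * p) v x hj (by omega) (by omega)]
    exact ih (p + 1) _ (by omega)

-- the invariant: A's interleaved loop equals partition-then-place
theorem pvGoA_eq (arr : List Int) : ∀ (ans : List Int) (p q : Int), 0 ≤ p → 0 ≤ q →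
    pvGoA ans (2 * p) (2 * q + 1) arr
      = pvFneg (pvFpos ans (PySem.List.enumerate (arr.filter (fun x => 0 ≤ x)) p))
               (PySem.List.enumerate (arr.filter (fun x => x < 0)) q) := by
  induction arr with
  | nil => intro ans p q _ _; simp [pvGoA, pvFpos, pvFneg, PySem.List.enumerate_nil]
  | cons num rest ih =>
    intro ans p q hp hq
    by_cases h : num < 0
    · have hf1 : (num :: rest).filter (fun x => (0 ≤ x : Bool)) = rest.filter (fun x => (0 ≤ x : Bool)) := by
        simp [not_le.2 h]
      have hf2 : (num :: rest).filter (fun x => (x < 0 : Bool)) = num :: rest.filter (fun x => (x < 0 : Bool)) := by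
        simp [h]
      rw [hf1, hf2, PySem.List.enumerate_cons]
      simp only [pvFneg, List.foldl_cons]
      have := pvFpos_set (rest.filter (fun x => (0 ≤ x : Bool))) p ans (2 * q + 1) num hp (by omega) (by omega)
      rw [← pvFneg, ← this]
      have hrec := ih (PySem.List.pySetD ans (2 * q + 1) num) p (q + 1) hp (by omega)
      simp only [pvGoA, h, if_pos]
      rw [show (2 * q + 1 + 2 : Int) = 2 * (q + 1) + 1 by ring]
      exact hrec
    · have hf1 : (num :: rest).filter (fun x => (0 ≤ x : Bool)) = num :: rest.filter (fun x => (0 ≤ x : Bool)) := by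
        simp [not_lt.1 h]
      have hf2 : (num :: rest).filter (fun x => (x < 0 : Bool)) = rest.filter (fun x => (x < 0 : Bool)) := by
        simp [h]
      rw [hf1, hf2, PySem.List.enumerate_cons]
      simp only [pvFpos, List.foldl_cons]
      have hrec := ih (PySem.List.pySetD ans (2 * p) num) (p + 1) q (by omega) hq
      simp only [pvGoA, h, if_false]
      rw [show (2 * p + 2 : Int) = 2 * (p + 1) by ring]
      exact hrec

-- ===== VERDICT (by name: the statement is the Claim_ definition above) =====
theorem rearrange_by_sign_optimal_spec : Claim_equal_rearrange_by_sign_optimal := by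
  intro arr _ _
  show rearrange_by_sign_optimal arr = rearrange_by_sign_optimal_alt arr
  unfold rearrange_by_sign_optimal rearrange_by_sign_optimal_alt
  have := pvGoA_eq arr (List.replicate arr.length 0) 0 0 le_rfl le_rfl
  simpa [pvFpos, pvFneg] using this
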